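-- pv_equiv track=rewrite | github.com/Domofold/liceum | zadanka/matura/czerwiec-2017/z.4.py | czy_cyfropodobne
-- ===== SOURCE A (Python) =====
-- def czy_cyfropodobne(a,b):
--     A = set()
--     B = set()
--     for cyfra in a:
--         A.add(cyfra)
--     for cyferka in b:
--         B.add(cyferka)
--     X = list(A)
--     X.sort()
--     Y = list(B)
--     Y.sort()
--     if X == Y:
--         return True
-- ===== SOURCE B (Python) =====
-- def czy_cyfropodobne(a, b):
--     if all(c in b for c in a) and all(c in a for c in b):
--         return True
-- ===== Notes on version B (the rewrite author's own statement) =====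
-- stated objective: simpler
-- what changed: B tests mutual character membership directly on the raw strings with two all(...) generator checks, instead of building two sets, converting them to lists, sorting both and comparing the sorted lists.
import Mathlib
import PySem

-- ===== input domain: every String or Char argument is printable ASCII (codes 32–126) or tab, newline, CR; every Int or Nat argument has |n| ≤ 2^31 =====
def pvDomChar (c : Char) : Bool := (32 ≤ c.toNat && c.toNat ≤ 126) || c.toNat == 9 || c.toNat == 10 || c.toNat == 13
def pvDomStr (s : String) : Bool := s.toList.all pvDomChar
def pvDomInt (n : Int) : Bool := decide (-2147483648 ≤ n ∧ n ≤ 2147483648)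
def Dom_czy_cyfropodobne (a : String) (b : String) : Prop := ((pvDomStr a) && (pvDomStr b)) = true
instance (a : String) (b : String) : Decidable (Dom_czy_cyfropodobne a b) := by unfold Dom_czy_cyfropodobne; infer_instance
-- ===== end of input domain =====

-- ===== PORT A =====
-- A: build two sets char by char, list+sort both, compare the sorted lists; return True or fall through (None).
def czy_cyfropodobne (a : String) (b : String) : Option Bool :=
  let A : PySem.Set Char := a.toList.foldl PySem.Set.add PySem.Set.empty
  let B : PySem.Set Char := b.toList.foldl PySem.Set.add PySem.Set.empty
  let X := PySem.List.sorted A (fun x => x) false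
  let Y := PySem.List.sorted B (fun x => x) false
  if X = Y then some true else none

-- ===== PORT B =====
-- B: mutual membership scans over the raw strings; no set, no sort.
def czy_cyfropodobne_alt (a : String) (b : String) : Option Bool :=
  if a.toList.all (fun c => b.toList.contains c) && b.toList.all (fun c => a.toList.contains c)
  then some true else none

-- ===== PRECONDITION & SPEC =====
def Spec_czy_cyfropodobne (a : String) (b : String) (out : Option Bool) : Prop := out = czy_cyfropodobne_alt a b
instance (a : String) (b : String) (out : Option Bool) : Decidable (Spec_czy_cyfropodobne a b out) := by unfold Spec_czy_cyfropodobne; infer_instance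

-- ===== CLAIM (what is proved, stated in full; the proofs are below) =====
def Claim_equal_czy_cyfropodobne : Prop := ∀ (a : String) (b : String), Dom_czy_cyfropodobne a b → Spec_czy_cyfropodobne a b (czy_cyfropodobne a b)

-- ===== LEMMAS AND PROOFS =====

-- ===== VERDICT (by name: the statement is the Claim_ definition above) =====
theorem czy_cyfropodobne_spec : Claim_equal_czy_cyfropodobne := by
  intro a b _
  unfold Spec_czy_cyfropodobne czy_cyfropodobne czy_cyfropodobne_alt
  refine if_congr ?_ rfl rfl
  rw [show (PySem.Set.empty : PySem.Set Char) = [] from rfl]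
  rw [← PySem.Set.ofList_eq_foldl, ← PySem.Set.ofList_eq_foldl,
      PySem.List.sorted_id_eq_sorted_id_iff_perm,
      List.perm_ext_iff_of_nodup (PySem.Set.nodup_ofList _) (PySem.Set.nodup_ofList _)]
  simp only [PySem.Set.mem_ofList, List.all_eq_true, List.contains_eq_mem,
             Bool.and_eq_true, decide_eq_true_eq]
  constructor
  · intro h
    exact ⟨fun c hc => (h c).1 hc, fun c hc => (h c).2 hc⟩
  · intro h x
    exact ⟨h.1 x, h.2 x⟩
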